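-- pv_equiv track=rewrite | github.com/MrBrantCode/unitest_baseline | mut_generate/mist_train_cf/cf_17046/solution.py | create_sorted_dict
-- ===== SOURCE A (Python) =====
-- def create_sorted_dict(input_string):
--     my_dict = {}
--     for char in input_string:
--         if char.isalpha():
--             char = char.lower()
--             if char in my_dict:
--                 my_dict[char] += 1
--             else:
--                 my_dict[char] = 1
--     return dict(sorted(my_dict.items()))
-- ===== SOURCE B (Python) =====
-- def create_sorted_dict(input_string):
--     normalized = [c.lower() for c in input_string if c.isalpha()]
--     result = {}
--     for key in sorted(set(normalized)):
--         result[key] = normalized.count(key)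
--     return result
-- ===== Notes on version B (the rewrite author's own statement) =====
-- stated objective: alternative
-- what changed: B first materialises the normalized lowercased-alpha list, then iterates over sorted(set(normalized)) filling each key's value with normalized.count(key), instead of A's single accumulating dict pass followed by sorting the dict's items.
import Mathlib
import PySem

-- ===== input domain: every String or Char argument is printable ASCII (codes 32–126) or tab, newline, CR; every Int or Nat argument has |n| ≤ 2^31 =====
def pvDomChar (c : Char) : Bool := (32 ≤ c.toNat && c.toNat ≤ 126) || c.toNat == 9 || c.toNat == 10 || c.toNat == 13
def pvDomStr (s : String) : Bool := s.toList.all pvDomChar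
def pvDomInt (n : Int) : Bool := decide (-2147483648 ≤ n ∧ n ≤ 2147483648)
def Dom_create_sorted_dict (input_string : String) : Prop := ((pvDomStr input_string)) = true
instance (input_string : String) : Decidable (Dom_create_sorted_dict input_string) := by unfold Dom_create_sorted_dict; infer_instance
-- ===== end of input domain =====

-- B replaces A's single accumulating dict pass + sort-of-items by: build the normalized
-- lowercased-alpha list, then iterate over sorted(set(normalized)) filling each count with
-- list.count (objective: alternative — index-then-repeated-scan instead of one accumulating pass).

-- ===== PORT A =====
-- 'for char in input_string' iterates 1-char strings; ported over the Char list with the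
-- key 'char.lower()' = PySem.Str.lower of the 1-char string (exact).
def create_sorted_dict (input_string : String) : List (String × Int) :=
  let my_dict : PySem.Dict String Int :=
    input_string.toList.foldl
      (fun (d : PySem.Dict String Int) ch =>
        if PySem.Chars.isalpha ch then
          let c := PySem.Str.lower (String.ofList [ch])
          if d.contains c then d.insert c (d.getD c 0 + 1) else d.insert c 1
        else d)
      PySem.Dict.empty
  PySem.List.sorted2 my_dict.items Prod.fst Prod.snd

-- ===== PORT B =====
def create_sorted_dict_alt (input_string : String) : List (String × Int) :=
  let normalized : List String :=
    (input_string.toList.filter PySem.Chars.isalpha).map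
      (fun ch => PySem.Str.lower (String.ofList [ch]))
  let result : PySem.Dict String Int :=
    (PySem.List.sorted (PySem.Set.ofList normalized) (fun k => k)).foldl
      (fun (r : PySem.Dict String Int) k => r.insert k ((normalized.count k : Nat) : Int))
      PySem.Dict.empty
  result.items

-- ===== PRECONDITION & SPEC =====
def Spec_create_sorted_dict (input_string : String) (out : List (String × Int)) : Prop := out = create_sorted_dict_alt input_string
instance (input_string : String) (out : List (String × Int)) : Decidable (Spec_create_sorted_dict input_string out) := by unfold Spec_create_sorted_dict; infer_instance

-- ===== CLAIM (what is proved, stated in full; the proofs are below) =====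
def Claim_equal_create_sorted_dict : Prop := ∀ (input_string : String), Dom_create_sorted_dict input_string → Spec_create_sorted_dict input_string (create_sorted_dict input_string)

-- ===== LEMMAS AND PROOFS =====

-- the shared normalization
def pvNorm (s : String) : List String :=
  (s.toList.filter PySem.Chars.isalpha).map (fun ch => PySem.Str.lower (String.ofList [ch]))

-- A's filtered/mapped fold over the chars is the plain fold over the normalized list
theorem pv_fold_filter_map {α β δ : Type} (p : α → Bool) (f : α → β)
    (step : δ → β → δ) :
    ∀ (cs : List α) (d : δ),
      cs.foldl (fun d c => if p c then step d (f c) else d) d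
        = ((cs.filter p).map f).foldl step d := by
  intro cs
  induction cs with
  | nil => intro d; rfl
  | cons c cs ih =>
    intro d
    by_cases h : p c = true <;> simp [h, ih]

-- A's dict is the Counter of the normalized list
theorem pvA_dict_eq_counter (s : String) :
    s.toList.foldl
      (fun (d : PySem.Dict String Int) ch =>
        if PySem.Chars.isalpha ch then
          let c := PySem.Str.lower (String.ofList [ch])
          if d.contains c then d.insert c (d.getD c 0 + 1) else d.insert c 1
        else d)
      PySem.Dict.empty
      = PySem.Dict.counter (pvNorm s) := by
  have hstep : (fun (d : PySem.Dict String Int) (x : String) =>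
      if d.contains x then d.insert x (d.getD x 0 + 1) else d.insert x 1)
      = fun d x => d.insert x (d.getD x 0 + 1) := by
    funext d x
    by_cases h : d.contains x = true
    · simp [h]
    · simp only [Bool.not_eq_true] at h
      simp [h, PySem.Dict.getD_of_not_contains d 0 h]
  rw [pv_fold_filter_map (δ := PySem.Dict String Int) PySem.Chars.isalpha
        (fun ch => PySem.Str.lower (String.ofList [ch]))
        (fun d x => if d.contains x then d.insert x (d.getD x 0 + 1) else d.insert x 1),
      hstep, PySem.Dict.foldl_insert_getD_add_one_eq_counter]
  rfl

-- insertBy only looks at comparisons of x against list elements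
theorem pv_insertBy_congr {α : Type} (b1 b2 : α → α → Bool) (x : α) :
    ∀ (ys : List α), (∀ y ∈ ys, b1 x y = b2 x y) →
      PySem.List.insertBy b1 x ys = PySem.List.insertBy b2 x ys := by
  intro ys
  induction ys with
  | nil => intro _; rfl
  | cons y ys ih =>
    intro h
    have hy := h y (by simp)
    simp only [PySem.List.insertBy, hy]
    by_cases hb : b2 x y = true
    · simp [hb]
    · simp only [Bool.not_eq_true] at hb
      simp [hb, ih (fun z hz => h z (by simp [hz]))]

-- a foldl of insertBy depends only on comparisons between elements of a covering set S
theorem pv_foldl_insertBy_congr {α : Type} (b1 b2 : α → α → Bool) (S : List α)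
    (hS : ∀ a ∈ S, ∀ b ∈ S, b1 a b = b2 a b) :
    ∀ (xs acc : List α), (∀ a ∈ xs, a ∈ S) → (∀ a ∈ acc, a ∈ S) →
      xs.foldl (fun acc x => PySem.List.insertBy b1 x acc) acc
        = xs.foldl (fun acc x => PySem.List.insertBy b2 x acc) acc := by
  intro xs
  induction xs with
  | nil => intro acc _ _; rfl
  | cons x xs ih =>
    intro acc hxs hacc
    have hx : x ∈ S := hxs x (by simp)
    simp only [List.foldl_cons]
    rw [pv_insertBy_congr b1 b2 x acc (fun y hy => hS x hx y (hacc y hy))]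
    exact ih _ (fun a ha => hxs a (by simp [ha]))
      (fun a ha => by
        rcases (PySem.List.insertBy_mem_iff b2 x a acc).mp ha with h | h
        · exact h ▸ hx
        · exact hacc a h)

-- on a list of pairs with pairwise-distinct first components, Python's tuple sort
-- (sorted2 fst snd) coincides with sorting by the first component alone
theorem pv_sorted2_eq_sorted_fst {ν : Type} [LinearOrder ν]
    (xs : List (String × ν))
    (hinj : ∀ a ∈ xs, ∀ b ∈ xs, a.1 = b.1 → a = b) :
    PySem.List.sorted2 xs Prod.fst Prod.snd = PySem.List.sorted xs Prod.fst := by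
  simp only [PySem.List.sorted2, PySem.List.sorted]
  apply pv_foldl_insertBy_congr _ _ xs _ xs [] (fun a ha => ha) (by simp)
  intro a ha b hb
  by_cases hab : a.1 = b.1
  · have : a = b := hinj a ha b hb hab
    subst this
    simp
  · rcases lt_or_gt_of_ne hab with h | h
    · simp [h]
    · simp [h, not_lt_of_gt h]

-- the sorted distinct keys of the normalized list
def pvKeys (s : String) : List String :=
  PySem.List.sorted (PySem.Set.ofList (pvNorm s)) (fun k => k)

theorem pvB_eq (s : String) :
    create_sorted_dict_alt s
      = (pvKeys s).map (fun k => (k, ((pvNorm s).count k : Int))) := by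
  show (((pvKeys s).foldl
      (fun (r : PySem.Dict String Int) k => r.insert k (((pvNorm s).count k : Nat) : Int))
      PySem.Dict.empty)).items = _
  rw [PySem.Dict.items_foldl_insert_fresh (pvKeys s) (fun k => k)
        (fun k => (((pvNorm s).count k : Nat) : Int)) PySem.Dict.empty
        (fun a _ => PySem.Dict.contains_empty a)
        (by
          simp only [List.map_id']
          exact ((PySem.List.sorted_perm (PySem.Set.ofList (pvNorm s)) (fun k => k)
            false).nodup_iff).mpr (PySem.Set.nodup_ofList (pvNorm s)))]
  rfl

theorem pvA_eq (s : String) :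
    create_sorted_dict s
      = (pvKeys s).map (fun k => (k, ((pvNorm s).count k : Int))) := by
  show PySem.List.sorted2 _ Prod.fst Prod.snd = _
  rw [pvA_dict_eq_counter s, PySem.Dict.items_counter (pvNorm s)]
  have hinj : ∀ a ∈ (PySem.Set.ofList (pvNorm s)).map
        (fun k => (k, ((pvNorm s).count k : Int))),
      ∀ b ∈ (PySem.Set.ofList (pvNorm s)).map
        (fun k => (k, ((pvNorm s).count k : Int))), a.1 = b.1 → a = b := by
    intro a ha b hb hab
    rcases List.mem_map.mp ha with ⟨k, _, rfl⟩
    rcases List.mem_map.mp hb with ⟨k', _, rfl⟩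
    simp only at hab
    subst hab
    rfl
  rw [pv_sorted2_eq_sorted_fst _ hinj]
  apply PySem.List.sorted_eq_of_perm_of_pairwise_lt
  · exact (PySem.List.sorted_perm (PySem.Set.ofList (pvNorm s)) (fun k => k) false).map _
  · rw [List.pairwise_map]
    exact PySem.List.sorted_ofList_pairwise_lt (pvNorm s)

-- ===== VERDICT (by name: the statement is the Claim_ definition above) =====
theorem create_sorted_dict_spec : Claim_equal_create_sorted_dict := by
  intro s _
  show create_sorted_dict s = create_sorted_dict_alt s
  rw [pvA_eq, pvB_eq]
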